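-- pv_equiv track=rewrite | github.com/wngrtn/SimpleTodo | todo.py | DetermineSortMode
-- ===== SOURCE A (Python) =====
-- def DetermineSortMode(s):
--     mode = None
--     count = -1
--     lines = s.split('\n')
--     while mode is None:
--         count += 1
--         if lines[count].startswith('# @'):
--             mode = 'context'
--         elif lines[count].startswith('# '):
--             mode = 'project'
--         else:
--             pass
--     return mode
-- ===== SOURCE B (Python) =====
-- def DetermineSortMode(s):
--     matches = [l for l in s.split('\n') if l.startswith('# ')]
--     return 'context' if matches[0].startswith('# @') else 'project'
-- ===== Notes on version B (the rewrite author's own statement) =====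
-- stated objective: simpler
-- what changed: Replaces the index-driven while loop with mutable state by a filter of all comment-prefixed lines followed by indexing the first one; no counter, no early-exit scan.
import Mathlib
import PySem

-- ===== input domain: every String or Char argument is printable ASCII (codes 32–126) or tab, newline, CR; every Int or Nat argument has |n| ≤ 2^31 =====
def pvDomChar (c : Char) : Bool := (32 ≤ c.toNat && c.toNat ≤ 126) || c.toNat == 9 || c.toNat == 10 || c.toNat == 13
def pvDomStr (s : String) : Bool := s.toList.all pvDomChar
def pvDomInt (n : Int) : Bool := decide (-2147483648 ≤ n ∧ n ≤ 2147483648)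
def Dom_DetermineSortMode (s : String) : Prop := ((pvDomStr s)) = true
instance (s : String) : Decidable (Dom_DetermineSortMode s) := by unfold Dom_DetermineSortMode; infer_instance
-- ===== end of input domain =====

-- B replaces A's index-driven while loop by filtering all '# '-prefixed lines and reading the first (simpler decomposition, same cost).


-- ===== PORT A =====
-- the while loop: advance count through `lines` until a line starts with '# @' or '# '
def dsmLoopA : List String → String
  | [] => ""  -- Python: lines[count] raises IndexError here; excluded by Pre_
  | l :: rest =>
    if PySem.Str.startswith l "# @" then "context"
    else if PySem.Str.startswith l "# " then "project"
    else dsmLoopA rest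

def DetermineSortMode (s : String) : String :=
  dsmLoopA ((PySem.Str.split? s "\n").getD [])

-- ===== PORT B =====
def DetermineSortMode_alt (s : String) : String :=
  let ms := ((PySem.Str.split? s "\n").getD []).filter (fun l => PySem.Str.startswith l "# ")
  match PySem.List.pyGet? ms 0 with
  | some m => if PySem.Str.startswith m "# @" then "context" else "project"
  | none => ""  -- Python: matches[0] raises IndexError here; excluded by Pre_

-- ===== PRECONDITION & SPEC =====
-- Pre_ admits exactly the inputs on which A returns: some line starts with '# ' (else A raises IndexError).
def Pre_DetermineSortMode (s : String) : Prop :=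
  ∃ l ∈ (PySem.Str.split? s "\n").getD [], PySem.Str.startswith l "# " = true
instance (s : String) : Decidable (Pre_DetermineSortMode s) := by unfold Pre_DetermineSortMode; infer_instance
def pvWitness_DetermineSortMode : String := "# @home\ncall mom"
def Spec_DetermineSortMode (s : String) (out : String) : Prop := out = DetermineSortMode_alt s
instance (s : String) (out : String) : Decidable (Spec_DetermineSortMode s out) := by unfold Spec_DetermineSortMode; infer_instance

-- ===== CLAIM (what is proved, stated in full; the proofs are below) =====
def Claim_equal_DetermineSortMode : Prop := ∀ (s : String), Dom_DetermineSortMode s → Pre_DetermineSortMode s → Spec_DetermineSortMode s (DetermineSortMode s)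

-- ===== LEMMAS AND PROOFS =====

theorem startswith_at_of_sharp (l : String)
    (h : PySem.Str.startswith l "# @" = true) : PySem.Str.startswith l "# " = true := by
  simp only [PySem.Str.startswith_eq, PySem.Chars.startswith_iff] at h ⊢
  exact List.IsPrefix.trans (by decide) h

theorem dsmLoop_eq_filter_head (ls : List String)
    (h : ∃ l ∈ ls, PySem.Str.startswith l "# " = true) :
    dsmLoopA ls =
      match PySem.List.pyGet? (ls.filter (fun l => PySem.Str.startswith l "# ")) 0 with
      | some m => if PySem.Str.startswith m "# @" then "context" else "project"
      | none => "" := by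
  induction ls with
  | nil => simp at h
  | cons l rest ih =>
    by_cases h1 : PySem.Str.startswith l "# @" = true
    · have h2 := startswith_at_of_sharp l h1
      simp only [PySem.Str.startswith_eq, show ("# @".toList = [Char.ofNat 35, Char.ofNat 32, Char.ofNat 64]) from rfl, show ("# ".toList = [Char.ofNat 35, Char.ofNat 32]) from rfl] at h1 h2
      simp [dsmLoopA, h1, h2, PySem.List.pyGet?, PySem.List.pyIdx?]
    · by_cases h2 : PySem.Str.startswith l "# " = true
      · simp only [PySem.Str.startswith_eq, show ("# @".toList = [Char.ofNat 35, Char.ofNat 32, Char.ofNat 64]) from rfl, show ("# ".toList = [Char.ofNat 35, Char.ofNat 32]) from rfl] at h1 h2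
        simp [dsmLoopA, h1, h2, PySem.List.pyGet?, PySem.List.pyIdx?]
      · have h' : ∃ x ∈ rest, PySem.Str.startswith x "# " = true := by
          rcases h with ⟨x, hx, hs⟩
          rcases List.mem_cons.mp hx with rfl | hx'
          · exact absurd hs h2
          · exact ⟨x, hx', hs⟩
        simp only [PySem.Str.startswith_eq, show ("# @".toList = [Char.ofNat 35, Char.ofNat 32, Char.ofNat 64]) from rfl, show ("# ".toList = [Char.ofNat 35, Char.ofNat 32]) from rfl] at h1 h2
        simp [dsmLoopA, h1, h2, ih h']

-- ===== VERDICT (by name: the statement is the Claim_ definition above) =====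
theorem DetermineSortMode_spec : Claim_equal_DetermineSortMode := by
  intro s _ hpre
  unfold Spec_DetermineSortMode DetermineSortMode DetermineSortMode_alt
  exact dsmLoop_eq_filter_head _ hpre
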